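-- pv_equiv track=rewrite | github.com/saipranavr/Columbus-ai | api.py | create_script_mapping
-- ===== SOURCE A (Python) =====
-- from typing import Optional, Dict, List, Tuple
--
-- def create_script_mapping(original_script: str, cleaned_script: str) -> Dict[int, str]:
--     """
--     Creates a mapping between positions in the cleaned script and their corresponding bracketed text
--     from the original script.
--
--     Args:
--         original_script: The original script with bracketed text
--         cleaned_script: The cleaned script without bracketed text
--
--     Returns:
--         A dictionary where:
--         - Keys are the positions (word indices) in the cleaned script
--         - Values are the bracketed text from the original script
--     """
--     # Split both scripts into words
--     original_words = original_script.split()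
--     cleaned_words = cleaned_script.split()
--
--     # Initialize mapping
--     mapping: Dict[int, str] = {}
--
--     # Track positions in both scripts
--     orig_pos = 0
--     clean_pos = 0
--
--     while orig_pos < len(original_words):
--         word = original_words[orig_pos]
--
--         # Check if this word contains the start of a bracket
--         if '[' in word:
--             # Find the complete bracketed text
--             bracket_text = ''
--             temp_pos = orig_pos
--             while temp_pos < len(original_words):
--                 current_word = original_words[temp_pos]
--                 bracket_text += current_word + ' '
--                 if ']' in current_word:
--                     break
--                 temp_pos += 1
--
--             # Store the mapping
--             mapping[clean_pos] = bracket_text.strip()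
--
--             # Skip all words that were part of the bracketed text
--             orig_pos = temp_pos + 1
--         else:
--             # If this word is not part of a bracket, increment both positions
--             orig_pos += 1
--             clean_pos += 1
--
--     return mapping
-- ===== SOURCE B (Python) =====
-- def create_script_mapping(original_script: str, cleaned_script: str):
--     """Single flat pass over the words with an in_bracket flag instead of
--     nested position loops."""
--     mapping = {}
--     clean_pos = 0
--     in_bracket = False
--     acc = ''
--     for word in original_script.split():
--         if in_bracket:
--             acc += word + ' '
--             if ']' in word:
--                 mapping[clean_pos] = acc.strip()
--                 in_bracket = False
--                 acc = ''
--         elif '[' in word: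
--             acc = word + ' '
--             if ']' in word:
--                 mapping[clean_pos] = acc.strip()
--                 acc = ''
--             else:
--                 in_bracket = True
--         else:
--             clean_pos += 1
--     if in_bracket:
--         mapping[clean_pos] = acc.strip()
--     return mapping
-- ===== Notes on version B (the rewrite author's own statement) =====
-- stated objective: simpler
-- what changed: Replaces the outer while-loop with a nested inner scan (which re-reads and skips bracketed words via index arithmetic) by a single flat pass over the words maintaining an in_bracket flag and an accumulator, flushing any unclosed bracket after the loop.
import Mathlib
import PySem

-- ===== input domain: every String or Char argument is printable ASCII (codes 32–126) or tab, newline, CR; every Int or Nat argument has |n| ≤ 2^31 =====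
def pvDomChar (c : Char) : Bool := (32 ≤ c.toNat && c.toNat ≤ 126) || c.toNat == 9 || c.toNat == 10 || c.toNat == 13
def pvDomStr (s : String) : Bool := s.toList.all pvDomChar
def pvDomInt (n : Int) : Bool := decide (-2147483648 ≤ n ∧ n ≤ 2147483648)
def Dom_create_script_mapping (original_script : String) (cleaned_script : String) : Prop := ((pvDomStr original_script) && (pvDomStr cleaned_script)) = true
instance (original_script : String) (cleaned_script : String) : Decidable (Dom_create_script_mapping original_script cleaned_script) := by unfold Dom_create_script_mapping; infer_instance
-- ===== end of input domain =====

-- B replaces A's nested scans (inner loop + index skip) by one flat pass with an in_bracket flag; same values, simpler loop.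

-- ===== PORT A =====
-- inner while loop of A: accumulate words into bracket_text until one containing ']';
-- returns (bracket_text, remaining words after temp_pos) — orig_pos = temp_pos + 1.
def pvInnerA (acc : String) : List String → String × List String
  | [] => (acc, [])
  | w :: rest =>
    let acc' := acc ++ w ++ " "
    if PySem.Str.isIn "]" w then (acc', rest) else pvInnerA acc' rest

theorem pvInnerA_len (acc : String) (l : List String) : (pvInnerA acc l).2.length ≤ l.length := by
  induction l generalizing acc with
  | nil => simp [pvInnerA]
  | cons w rest ih =>
    simp only [pvInnerA]
    split
    · simp
    · exact Nat.le_trans (ih _) (Nat.le_succ _)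

theorem pvInnerA_cons_lt (acc w : String) (rest : List String) :
    (pvInnerA acc (w :: rest)).2.length < (w :: rest).length := by
  simp only [pvInnerA]
  split
  · simp
  · exact Nat.lt_succ_of_le (pvInnerA_len _ _)

-- outer while loop of A
def pvOuterA : List String → Int → PySem.Dict Int String → PySem.Dict Int String
  | [], _, m => m
  | w :: rest, clean, m =>
    if PySem.Str.isIn "[" w then
      let p := pvInnerA "" (w :: rest)
      pvOuterA p.2 clean (m.insert clean (PySem.Str.strip p.1))
    else
      pvOuterA rest (clean + 1) m
termination_by l => l.length
decreasing_by
  · exact pvInnerA_cons_lt "" w rest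
  · simp

def create_script_mapping (original_script : String) (cleaned_script : String) : List (Int × String) :=
  let original_words := PySem.Str.split₀ original_script
  let _cleaned_words := PySem.Str.split₀ cleaned_script
  (pvOuterA original_words 0 PySem.Dict.empty).items

-- ===== PORT B =====
-- one flat pass: state = (clean_pos, in_bracket, acc, mapping); flush after the loop
def pvLoopB : List String → Int → Bool → String → PySem.Dict Int String → PySem.Dict Int String
  | [], clean, inb, acc, m => if inb then m.insert clean (PySem.Str.strip acc) else m
  | w :: rest, clean, inb, acc, m =>
    if inb then
      let acc' := acc ++ w ++ " "
      if PySem.Str.isIn "]" w then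
        pvLoopB rest clean false "" (m.insert clean (PySem.Str.strip acc'))
      else
        pvLoopB rest clean true acc' m
    else if PySem.Str.isIn "[" w then
      if PySem.Str.isIn "]" w then
        pvLoopB rest clean false "" (m.insert clean (PySem.Str.strip (w ++ " ")))
      else
        pvLoopB rest clean true (w ++ " ") m
    else
      pvLoopB rest (clean + 1) inb acc m

def create_script_mapping_alt (original_script : String) (cleaned_script : String) : List (Int × String) :=
  (pvLoopB (PySem.Str.split₀ original_script) 0 false "" PySem.Dict.empty).items

-- ===== PRECONDITION & SPEC =====
def Spec_create_script_mapping (original_script : String) (cleaned_script : String) (out : List (Int × String)) : Prop := out = create_script_mapping_alt original_script cleaned_script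
instance (original_script : String) (cleaned_script : String) (out : List (Int × String)) : Decidable (Spec_create_script_mapping original_script cleaned_script out) := by unfold Spec_create_script_mapping; infer_instance

-- ===== CLAIM (what is proved, stated in full; the proofs are below) =====
def Claim_equal_create_script_mapping : Prop := ∀ (original_script : String) (cleaned_script : String), Dom_create_script_mapping original_script cleaned_script → Spec_create_script_mapping original_script cleaned_script (create_script_mapping original_script cleaned_script)

-- ===== LEMMAS AND PROOFS =====

-- joint strong induction on the word-list length: the two loops agree, and B's
-- in_bracket state corresponds to A's inner scan followed by the outer loop.
theorem pvBoth (n : Nat) : ∀ (l : List String), l.length ≤ n →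
    (∀ (c : Int) (m : PySem.Dict Int String), pvOuterA l c m = pvLoopB l c false "" m) ∧
    (∀ (c : Int) (acc : String) (m : PySem.Dict Int String),
      pvLoopB l c true acc m =
        pvOuterA (pvInnerA acc l).2 c (m.insert c (PySem.Str.strip (pvInnerA acc l).1))) := by
  induction n with
  | zero =>
    intro l hl
    have : l = [] := List.length_eq_zero_iff.mp (Nat.le_zero.mp hl)
    subst this
    constructor
    · intro c m; simp [pvOuterA, pvLoopB]
    · intro c acc m; simp [pvOuterA, pvLoopB, pvInnerA]
  | succ n ih =>
    intro l hl
    cases l with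
    | nil =>
      constructor
      · intro c m; simp [pvOuterA, pvLoopB]
      · intro c acc m; simp [pvOuterA, pvLoopB, pvInnerA]
    | cons w rest =>
      have hr : rest.length ≤ n := Nat.le_of_succ_le_succ hl
      constructor
      · intro c m
        rw [pvOuterA]
        by_cases hb : PySem.Str.isIn "[" w = true
        · simp only [hb, if_pos, pvInnerA]
          by_cases hc : PySem.Str.isIn "]" w = true
          · simp only [hc, if_pos]
            rw [pvLoopB]
            simp only [hb, hc, if_pos, if_neg (Bool.false_ne_true)]
            exact (ih rest hr).1 c _
          · simp only [hc, Bool.false_eq_true, if_false]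
            rw [pvLoopB]
            simp only [hb, hc, Bool.false_eq_true, if_true, if_false]
            have h2 := (ih rest hr).2 c ("" ++ w ++ " ") m
            simpa using h2.symm
        · simp only [hb, Bool.false_eq_true, if_false]
          rw [pvLoopB]
          simp only [hb, Bool.false_eq_true, if_false]
          exact (ih rest hr).1 (c + 1) m
      · intro c acc m
        rw [pvLoopB, pvInnerA]
        by_cases hc : PySem.Str.isIn "]" w = true
        · simp only [hc, if_pos]
          exact ((ih rest hr).1 c _).symm
        · simp only [hc, Bool.false_eq_true, if_false, if_true]
          exact (ih rest hr).2 c (acc ++ w ++ " ") m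

-- ===== VERDICT (by name: the statement is the Claim_ definition above) =====
theorem create_script_mapping_spec : Claim_equal_create_script_mapping := by
  intro o cl _
  unfold Spec_create_script_mapping create_script_mapping create_script_mapping_alt
  have h := (pvBoth (PySem.Str.split₀ o).length (PySem.Str.split₀ o) (Nat.le_refl _)).1 0 PySem.Dict.empty
  simp [h]
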